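-- pv_equiv track=rewrite | github.com/Ashiq-am/Path-of-Python | 3.Data Types/Arrays Set 1 and Set 2/Prefix Sum/Queries to flip characters of a binary string in given range/Queries to flip characters of a binary string in given range.py | toggleQuery
-- ===== SOURCE A (Python) =====
-- def toggleQuery(strr, Q, M):
--     strr = [i for i in strr]
--
--     # Stores length of the strring
--     N = len(strr)
--
--     # prefixCnt[i]: Stores number
--     # of times strr[i] toggled by
--     # performing all the queries
--     prefixCnt = [0] * (N + 1)
--
--     for i in range(M):
--         # Update prefixCnt[Q[i][0]]
--         prefixCnt[Q[i][0]] += 1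
--
--         # Update prefixCnt[Q[i][1] + 1]
--         prefixCnt[Q[i][1] + 1] -= 1
--
--     # Calculate prefix sum of prefixCnt[i]
--     for i in range(1, N + 1):
--         prefixCnt[i] += prefixCnt[i - 1]
--
--     # Traverse prefixCnt[] array
--     for i in range(N):
--
--         # If ith element toggled
--         # odd number of times
--         if (prefixCnt[i] % 2):
--             # Toggled i-th element
--             # of binary strring
--             strr[i] = (chr(ord('1') -
--                            ord(strr[i]) +
--                            ord('0')))
--
--     return "".join(strr)
-- ===== SOURCE B (Python) =====
-- def toggleQuery(strr, Q, M):
--     # Direct counting: for each query, bump a per-position counter over the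
--     # queried range; then flip every position toggled an odd number of times.
--     n = len(strr)
--     cnt = [0] * n
--     for i in range(M):
--         for j in range(Q[i][0], Q[i][1] + 1):
--             cnt[j] += 1
--     out = []
--     for i, c in enumerate(strr):
--         out.append(chr(ord('1') - ord(c) + ord('0')) if cnt[i] % 2 else c)
--     return "".join(out)
-- ===== Notes on version B (the rewrite author's own statement) =====
-- stated objective: simpler
-- what changed: Replaces the difference-array endpoint marking plus in-place prefix-sum pass with a plain per-position counter incremented directly over each queried range, and rebuilds the string in one enumerate pass instead of mutating the char list.
-- outside the precondition, e.g. on toggleQuery('01', [[-1, 0]], 1): A returns '00', B returns '10'; on toggleQuery('0000', [[2, 0]], 1): A returns '0100', B returns '0000'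
import Mathlib
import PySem

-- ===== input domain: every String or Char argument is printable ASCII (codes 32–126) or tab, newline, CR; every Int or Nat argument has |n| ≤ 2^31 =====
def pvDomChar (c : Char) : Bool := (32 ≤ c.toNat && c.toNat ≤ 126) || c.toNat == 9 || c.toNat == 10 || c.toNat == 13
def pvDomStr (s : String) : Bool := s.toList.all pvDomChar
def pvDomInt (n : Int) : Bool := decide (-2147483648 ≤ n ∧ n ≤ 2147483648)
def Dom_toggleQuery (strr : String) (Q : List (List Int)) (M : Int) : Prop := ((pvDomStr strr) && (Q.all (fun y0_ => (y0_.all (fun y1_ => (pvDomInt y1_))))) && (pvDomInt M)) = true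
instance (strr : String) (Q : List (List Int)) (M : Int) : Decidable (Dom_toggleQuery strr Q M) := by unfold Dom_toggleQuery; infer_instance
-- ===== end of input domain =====

-- B replaces A's difference-array + prefix-sum passes with a direct per-position
-- counter incremented over each queried range (simpler, not faster).


-- ===== PORT A =====
-- literal transliteration of A: diff array of length N+1, endpoint marking,
-- in-place prefix sum, then flip by chr(ord('1') - ord(c) + ord('0')).
def toggleQuery (strr : String) (Q : List (List Int)) (M : Int) : String :=
  let s := strr.toList
  let N : Int := (s.length : Int)
  let pc : List Int := List.replicate (s.length + 1) 0
  let pc := (PySem.List.pyRange 0 M 1).foldl (fun pc i =>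
      let q := PySem.List.pyGetD Q i []
      let pc := PySem.List.pySetD pc (PySem.List.pyGetD q 0 0)
                  (PySem.List.pyGetD pc (PySem.List.pyGetD q 0 0) 0 + 1)
      PySem.List.pySetD pc (PySem.List.pyGetD q 1 0 + 1)
        (PySem.List.pyGetD pc (PySem.List.pyGetD q 1 0 + 1) 0 - 1)) pc
  let pc := (PySem.List.pyRange 1 (N + 1) 1).foldl (fun pc i =>
      PySem.List.pySetD pc i
        (PySem.List.pyGetD pc i 0 + PySem.List.pyGetD pc (i - 1) 0)) pc
  let s := (PySem.List.pyRange 0 N 1).foldl (fun t i =>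
      if PySem.Int.mod (PySem.List.pyGetD pc i 0) 2 ≠ 0 then
        -- chr(ord('1') - ord(strr[i]) + ord('0')); exact where chr's argument is ≥ 0, which Pre_ guarantees at toggled positions
        PySem.List.pySetD t i
          (Char.ofNat ((49 - ((PySem.List.pyGetD t i ' ').toNat : Int) + 48).toNat))
      else t) s
  String.ofList s

-- ===== PORT B =====
-- literal transliteration of Source B: per-position counter, direct range increments,
-- then one enumerate pass rebuilding the string (same chr-arithmetic flip as A).
def toggleQuery_alt (strr : String) (Q : List (List Int)) (M : Int) : String :=
  let s := strr.toList
  let cnt : List Int := List.replicate s.length 0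
  let cnt := (PySem.List.pyRange 0 M 1).foldl (fun cnt i =>
      let q := PySem.List.pyGetD Q i []
      (PySem.List.pyRange (PySem.List.pyGetD q 0 0) (PySem.List.pyGetD q 1 0 + 1) 1).foldl
        (fun cnt j => PySem.List.pySetD cnt j (PySem.List.pyGetD cnt j 0 + 1)) cnt) cnt
  let out := (PySem.List.enumerate s 0).foldl (fun out p =>
      out ++ [if PySem.Int.mod (PySem.List.pyGetD cnt p.1 0) 2 ≠ 0 then
                Char.ofNat ((49 - ((p.2).toNat : Int) + 48).toNat) else p.2]) []
  String.ofList out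

-- ===== PRECONDITION & SPEC =====
-- Pre_ restricts to the function's natural domain — each applied query in range and
-- ordered (0 ≤ l ≤ r < N, M ≤ len(Q)), and every position toggled an odd number of
-- times holds a char of code ≤ 97 (ord('1')+ord('0')), so chr() is defined: outside
-- it A raises (IndexError/ValueError) or returns artefacts of raw list indexing —
-- negative-index wraparound and reversed queries toggling the complement segment.
def Pre_toggleQuery (strr : String) (Q : List (List Int)) (M : Int) : Prop :=
  M ≤ (Q.length : Int) ∧
  (Q.take M.toNat).all (fun q =>
    decide (2 ≤ q.length) && decide (0 ≤ PySem.List.pyGetD q 0 0) &&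
    decide (PySem.List.pyGetD q 0 0 ≤ PySem.List.pyGetD q 1 0) &&
    decide (PySem.List.pyGetD q 1 0 < (strr.toList.length : Int))) = true ∧
  (PySem.List.enumerate strr.toList).all (fun p =>
    decide ((Q.take M.toNat).countP (fun q =>
      decide (PySem.List.pyGetD q 0 0 ≤ p.1 ∧ p.1 ≤ PySem.List.pyGetD q 1 0)) % 2 = 0) ||
    decide (p.2.toNat ≤ 97)) = true
instance (strr : String) (Q : List (List Int)) (M : Int) : Decidable (Pre_toggleQuery strr Q M) := by unfold Pre_toggleQuery; infer_instance

def pvWitness_toggleQuery : String × List (List Int) × Int := ("01", [[0, 1]], 1)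

def Spec_toggleQuery (strr : String) (Q : List (List Int)) (M : Int) (out : String) : Prop := out = toggleQuery_alt strr Q M
instance (strr : String) (Q : List (List Int)) (M : Int) (out : String) : Decidable (Spec_toggleQuery strr Q M out) := by unfold Spec_toggleQuery; infer_instance

-- ===== CLAIM (what is proved, stated in full; the proofs are below) =====
def Claim_equal_toggleQuery : Prop := ∀ (strr : String) (Q : List (List Int)) (M : Int), Dom_toggleQuery strr Q M → Pre_toggleQuery strr Q M → Spec_toggleQuery strr Q M (toggleQuery strr Q M)

-- ===== LEMMAS AND PROOFS =====

-- number of queries in qs covering position i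
def pvCov (qs : List (List Int)) (i : Int) : Int :=
  (qs.map (fun q => if PySem.List.pyGetD q 0 0 ≤ i ∧ i ≤ PySem.List.pyGetD q 1 0 then (1:Int) else 0)).sum

-- prefix sum of xs up to (and including) position i
def pvPS (xs : List Int) (i : Int) : Int := (xs.take (i.toNat + 1)).sum

theorem pvFoldLen {a : Type} (l : List a) (f : List Int → a → List Int)
    (h : ∀ c x, (f c x).length = c.length) :
    ∀ c, (l.foldl f c).length = c.length := by
  induction l with
  | nil => intro c; rfl
  | cons x t ih => intro c; rw [List.foldl_cons, ih, h]

theorem pvGetSet (c : List Int) (n k : Int) (hn0 : 0 ≤ n) (hn : n < (c.length : Int))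
    (hk0 : 0 ≤ k) (hk : k < (c.length : Int)) (v : Int) :
    PySem.List.pyGetD (PySem.List.pySetD c n v) k 0
      = if k = n then v else PySem.List.pyGetD c k 0 := by
  rw [PySem.List.pySetD_of_nonneg c v hn0]
  rw [PySem.List.pyGetD_eq_getElem _ 0 hk0 (by simpa using hk),
      PySem.List.pyGetD_eq_getElem c 0 hk0 hk]
  rw [List.getElem_set]
  rcases eq_or_ne k n with h | h
  · subst h; simp
  · rw [if_neg (by omega), if_neg h]

theorem pvSumSetInt (d : List Int) (n : Nat) (v : Int) (h : n < d.length) :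
    (d.set n v).sum = d.sum + v - d[n] := by
  induction d generalizing n with
  | nil => simp at h
  | cons x t ih =>
    cases n with
    | zero => simp; ring
    | succ m =>
      simp only [List.set_cons_succ, List.sum_cons, List.getElem_cons_succ]
      rw [ih m (by simpa using h)]; ring

theorem pvPS_set (c : List Int) (n : Int) (hn0 : 0 ≤ n) (hn : n < (c.length : Int))
    (v i : Int) (hi0 : 0 ≤ i) :
    pvPS (PySem.List.pySetD c n v) i
      = pvPS c i + (if n ≤ i then v - PySem.List.pyGetD c n 0 else 0) := by
  rw [PySem.List.pySetD_of_nonneg c v hn0]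
  unfold pvPS
  rw [List.take_set]
  by_cases h : n ≤ i
  · have hlt : n.toNat < (c.take (i.toNat + 1)).length := by
      rw [List.length_take]; omega
    rw [pvSumSetInt _ _ _ hlt, List.getElem_take,
        PySem.List.pyGetD_eq_getElem c 0 hn0 hn, if_pos h]
    ring
  · have hge : (c.take (i.toNat + 1)).length ≤ n.toNat := by
      rw [List.length_take]; omega
    rw [List.set_eq_of_length_le hge, if_neg h, add_zero]

theorem pvQfold {b : Type} (Q : List (List Int)) (M : Int) (hM : M ≤ (Q.length : Int))
    (f : b → List Int → b) (init : b) :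
    (PySem.List.pyRange 0 M 1).foldl (fun acc i => f acc (PySem.List.pyGetD Q i [])) init
      = (Q.take M.toNat).foldl f init := by
  rcases (by omega : M ≤ 0 ∨ 0 < M) with hM0 | hM0
  · rw [PySem.List.pyRange_one_eq_nil hM0]
    have h0 : M.toNat = 0 := by omega
    simp [h0]
  · have hlen : (Q.take M.toNat).length = M.toNat := by
      rw [List.length_take]; omega
    have h1 : (PySem.List.pyRange 0 M).foldl
          (fun acc i => f acc (PySem.List.pyGetD Q i [])) init
        = (PySem.List.pyRange 0 M).foldl
          (fun acc i => f acc (PySem.List.pyGetD (Q.take M.toNat) i [])) init := by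
      apply PySem.List.foldl_congr_mem
      intro acc x hx
      rw [PySem.List.mem_pyRange_one] at hx
      obtain ⟨hx0, hxM⟩ := hx
      rw [PySem.List.pyGetD_eq_getElem _ _ hx0 (by omega),
          PySem.List.pyGetD_eq_getElem _ _ hx0 (by rw [hlen]; omega),
          List.getElem_take]
    rw [h1]
    set qs := Q.take M.toNat with hqs
    rw [show M = (qs.length : Int) by rw [hqs, hlen]; omega]
    exact PySem.List.foldl_pyRange_zero_pyGetD' qs [] f init

-- B's inner loop: increment every counter in [a, b)
theorem pvIncr : ∀ (fuel : Nat) (a bnd : Int) (c : List Int), (bnd - a).toNat = fuel →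
    0 ≤ a → bnd ≤ (c.length : Int) → ∀ k : Int, 0 ≤ k → k < (c.length : Int) →
    PySem.List.pyGetD ((PySem.List.pyRange a bnd 1).foldl
        (fun c j => PySem.List.pySetD c j (PySem.List.pyGetD c j 0 + 1)) c) k 0
      = PySem.List.pyGetD c k 0 + (if a ≤ k ∧ k < bnd then 1 else 0) := by
  intro fuel
  induction fuel with
  | zero =>
    intro a bnd c hf ha hb k hk0 hk
    rw [PySem.List.pyRange_one_eq_nil (by omega), List.foldl_nil, if_neg (by omega), add_zero]
  | succ n ih =>
    intro a bnd c hf ha hb k hk0 hk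
    have hab : a < bnd := by omega
    rw [PySem.List.pyRange_one_cons hab, List.foldl_cons]
    have hlen : (PySem.List.pySetD c a (PySem.List.pyGetD c a 0 + 1)).length = c.length :=
      PySem.List.length_pySetD c a _
    rw [ih (a + 1) bnd _ (by omega) (by omega) (by rw [hlen]; exact hb) k hk0 (by rw [hlen]; exact hk)]
    rw [pvGetSet c a k ha (by omega) hk0 hk]
    rcases eq_or_ne k a with h | h
    · subst h
      rw [if_pos rfl, if_neg (by omega), if_pos (by omega)]
      ring
    · rw [if_neg h]
      congr 1
      apply if_congr _ rfl rfl
      constructor <;> (intro hh; exact ⟨by omega, hh.2⟩)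

theorem pvIncrLen (a bnd : Int) (c : List Int) :
    ((PySem.List.pyRange a bnd 1).foldl
        (fun c j => PySem.List.pySetD c j (PySem.List.pyGetD c j 0 + 1)) c).length = c.length := by
  exact pvFoldLen _ _ (fun c x => PySem.List.length_pySetD c x _) c

-- B's outer loop: counters accumulate coverage counts
theorem pvCnt : ∀ (qs : List (List Int)) (c : List Int),
    (∀ q ∈ qs, 0 ≤ PySem.List.pyGetD q 0 0 ∧
      PySem.List.pyGetD q 0 0 ≤ PySem.List.pyGetD q 1 0 ∧
      PySem.List.pyGetD q 1 0 < (c.length : Int)) →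
    ∀ k : Int, 0 ≤ k → k < (c.length : Int) →
    PySem.List.pyGetD (qs.foldl (fun cnt q =>
        (PySem.List.pyRange (PySem.List.pyGetD q 0 0) (PySem.List.pyGetD q 1 0 + 1) 1).foldl
          (fun cnt j => PySem.List.pySetD cnt j (PySem.List.pyGetD cnt j 0 + 1)) cnt) c) k 0
      = PySem.List.pyGetD c k 0 + pvCov qs k := by
  intro qs
  induction qs with
  | nil => intro c h k hk0 hk; simp [pvCov]
  | cons q t ih =>
    intro c h k hk0 hk
    obtain ⟨hq0, hqlr, hqr⟩ := h q List.mem_cons_self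
    rw [List.foldl_cons]
    have hlen := pvIncrLen (PySem.List.pyGetD q 0 0) (PySem.List.pyGetD q 1 0 + 1) c
    rw [ih _ (fun q' hq' => by rw [hlen]; exact h q' (List.mem_cons_of_mem _ hq'))
        k hk0 (by rw [hlen]; exact hk)]
    rw [pvIncr ((PySem.List.pyGetD q 1 0 + 1) - PySem.List.pyGetD q 0 0).toNat
        (PySem.List.pyGetD q 0 0) (PySem.List.pyGetD q 1 0 + 1) c rfl hq0 (by omega) k hk0 hk]
    have hcov : pvCov (q :: t) k
        = (if PySem.List.pyGetD q 0 0 ≤ k ∧ k < PySem.List.pyGetD q 1 0 + 1 then 1 else 0)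
          + pvCov t k := by
      unfold pvCov
      rw [List.map_cons, List.sum_cons]
      congr 1
      apply if_congr _ rfl rfl
      constructor <;> (intro hh; exact ⟨hh.1, by omega⟩)
    rw [hcov]; ring

-- A's marking loop: prefix sums accumulate coverage counts
theorem pvPhase1 : ∀ (qs : List (List Int)) (c : List Int),
    (∀ q ∈ qs, 0 ≤ PySem.List.pyGetD q 0 0 ∧
      PySem.List.pyGetD q 0 0 ≤ PySem.List.pyGetD q 1 0 ∧
      PySem.List.pyGetD q 1 0 + 1 < (c.length : Int)) →
    ∀ i : Int, 0 ≤ i → i < (c.length : Int) →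
    pvPS (qs.foldl (fun pc q =>
        PySem.List.pySetD (PySem.List.pySetD pc (PySem.List.pyGetD q 0 0)
            (PySem.List.pyGetD pc (PySem.List.pyGetD q 0 0) 0 + 1))
          (PySem.List.pyGetD q 1 0 + 1)
          (PySem.List.pyGetD (PySem.List.pySetD pc (PySem.List.pyGetD q 0 0)
              (PySem.List.pyGetD pc (PySem.List.pyGetD q 0 0) 0 + 1))
            (PySem.List.pyGetD q 1 0 + 1) 0 - 1)) c) i
      = pvPS c i + pvCov qs i := by
  intro qs
  induction qs with
  | nil => intro c h i hi0 hi; simp [pvCov]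
  | cons q t ih =>
    intro c h i hi0 hi
    obtain ⟨hq0, hqlr, hqr⟩ := h q List.mem_cons_self
    simp only [List.foldl_cons]
    have hlen1 : (PySem.List.pySetD c (PySem.List.pyGetD q 0 0)
        (PySem.List.pyGetD c (PySem.List.pyGetD q 0 0) 0 + 1)).length = c.length :=
      PySem.List.length_pySetD _ _ _
    have hlen2 : (PySem.List.pySetD (PySem.List.pySetD c (PySem.List.pyGetD q 0 0)
        (PySem.List.pyGetD c (PySem.List.pyGetD q 0 0) 0 + 1))
        (PySem.List.pyGetD q 1 0 + 1)
        (PySem.List.pyGetD (PySem.List.pySetD c (PySem.List.pyGetD q 0 0)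
            (PySem.List.pyGetD c (PySem.List.pyGetD q 0 0) 0 + 1))
          (PySem.List.pyGetD q 1 0 + 1) 0 - 1)).length = c.length := by
      rw [PySem.List.length_pySetD, hlen1]
    rw [ih _ (fun q' hq' => by rw [hlen2]; exact h q' (List.mem_cons_of_mem _ hq'))
        i hi0 (by rw [hlen2]; exact hi)]
    rw [pvPS_set _ (PySem.List.pyGetD q 1 0 + 1) (by omega) (by rw [hlen1]; omega) _ i hi0]
    rw [pvPS_set c (PySem.List.pyGetD q 0 0) hq0 (by omega) _ i hi0]
    have hcov : pvCov (q :: t) i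
        = (if PySem.List.pyGetD q 0 0 ≤ i ∧ i ≤ PySem.List.pyGetD q 1 0 then 1 else 0)
          + pvCov t i := by
      unfold pvCov
      rw [List.map_cons, List.sum_cons]
    rw [hcov]
    split_ifs <;> omega

theorem pvPhase1Len (qs : List (List Int)) (c : List Int) :
    (qs.foldl (fun pc q =>
        PySem.List.pySetD (PySem.List.pySetD pc (PySem.List.pyGetD q 0 0)
            (PySem.List.pyGetD pc (PySem.List.pyGetD q 0 0) 0 + 1))
          (PySem.List.pyGetD q 1 0 + 1)
          (PySem.List.pyGetD (PySem.List.pySetD pc (PySem.List.pyGetD q 0 0)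
              (PySem.List.pyGetD pc (PySem.List.pyGetD q 0 0) 0 + 1))
            (PySem.List.pyGetD q 1 0 + 1) 0 - 1)) c).length = c.length := by
  exact pvFoldLen _ _ (fun c x => by rw [PySem.List.length_pySetD, PySem.List.length_pySetD]) c

theorem pvPS_zero (c : List Int) (h : 0 < c.length) :
    pvPS c 0 = PySem.List.pyGetD c 0 0 := by
  cases c with
  | nil => simp at h
  | cons x t => simp [pvPS, PySem.List.pyGetD_zero_cons]

theorem pvPS_succ (c : List Int) (t : Int) (h1 : 1 ≤ t) (h2 : t < (c.length : Int)) :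
    pvPS c t = pvPS c (t - 1) + PySem.List.pyGetD c t 0 := by
  unfold pvPS
  have h' : t.toNat + 1 = ((t - 1).toNat + 1) + 1 := by omega
  rw [h', List.sum_take_succ c ((t - 1).toNat + 1) (by omega)]
  congr 1
  rw [PySem.List.pyGetD_eq_getElem c 0 (by omega) h2]
  congr 1
  omega

-- A's in-place prefix-sum loop computes pvPS of the array it started from
theorem pvPhase2 : ∀ (fuel : Nat) (t : Int) (c orig : List Int),
    ((orig.length : Int) - t).toNat = fuel → 1 ≤ t → c.length = orig.length →
    (∀ j : Int, 0 ≤ j → j < t → PySem.List.pyGetD c j 0 = pvPS orig j) →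
    (∀ j : Int, t ≤ j → j < (c.length : Int) →
      PySem.List.pyGetD c j 0 = PySem.List.pyGetD orig j 0) →
    ∀ k : Int, 0 ≤ k → k < (c.length : Int) →
    PySem.List.pyGetD ((PySem.List.pyRange t (orig.length : Int) 1).foldl (fun pc i =>
        PySem.List.pySetD pc i
          (PySem.List.pyGetD pc i 0 + PySem.List.pyGetD pc (i - 1) 0)) c) k 0
      = pvPS orig k := by
  intro fuel
  induction fuel with
  | zero =>
    intro t c orig hf h1 hlen hlow hhigh k hk0 hk
    rw [PySem.List.pyRange_one_eq_nil (by omega), List.foldl_nil]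
    exact hlow k hk0 (by omega)
  | succ n ih =>
    intro t c orig hf h1 hlen hlow hhigh k hk0 hk
    have htl : t < (orig.length : Int) := by omega
    have htc : t < (c.length : Int) := by rw [hlen]; exact htl
    rw [PySem.List.pyRange_one_cons htl]
    simp only [List.foldl_cons]
    have hlen' : (PySem.List.pySetD c t
        (PySem.List.pyGetD c t 0 + PySem.List.pyGetD c (t - 1) 0)).length = c.length :=
      PySem.List.length_pySetD _ _ _
    apply ih (t + 1) _ orig (by omega) (by omega) (by rw [hlen']; exact hlen)
    · intro j hj0 hjt
      rw [pvGetSet c t j (by omega) htc hj0 (by omega)]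
      rcases eq_or_ne j t with h | h
      · subst h
        rw [if_pos rfl, hhigh j (by omega) (by omega), hlow (j - 1) (by omega) (by omega),
          pvPS_succ orig j (by omega) (by omega)]
        ring
      · rw [if_neg h]
        exact hlow j hj0 (by omega)
    · intro j hj1 hj2
      rw [hlen'] at hj2
      rw [pvGetSet c t j (by omega) htc (by omega) (by omega), if_neg (by omega)]
      exact hhigh j (by omega) (by omega)
    · exact hk0
    · rw [hlen']; exact hk

-- A's final flip loop, characterised elementwise
theorem pvFlip (w : List Int) :
    ∀ (fuel : Nat) (a b : Int) (t : List Char), (b - a).toNat = fuel → 0 ≤ a →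
    b = (t.length : Int) →
    (((PySem.List.pyRange a b 1).foldl (fun t i =>
        if PySem.Int.mod (PySem.List.pyGetD w i 0) 2 ≠ 0 then
          PySem.List.pySetD t i
            (Char.ofNat ((49 - ((PySem.List.pyGetD t i ' ').toNat : Int) + 48).toNat))
        else t) t).length = t.length) ∧
    ∀ (k : Nat) (hk : k < t.length),
    ((PySem.List.pyRange a b 1).foldl (fun t i =>
        if PySem.Int.mod (PySem.List.pyGetD w i 0) 2 ≠ 0 then
          PySem.List.pySetD t i
            (Char.ofNat ((49 - ((PySem.List.pyGetD t i ' ').toNat : Int) + 48).toNat))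
        else t) t)[k]?
      = some (if a ≤ (k : Int) ∧ PySem.Int.mod (PySem.List.pyGetD w (k : Int) 0) 2 ≠ 0 then
          Char.ofNat ((49 - (((t[k]).toNat : Int)) + 48).toNat) else t[k]) := by
  intro fuel
  induction fuel with
  | zero =>
    intro a b t hf ha hb
    rw [PySem.List.pyRange_one_eq_nil (by omega), List.foldl_nil]
    refine ⟨rfl, ?_⟩
    intro k hk
    rw [List.getElem?_eq_getElem hk, if_neg (by rintro ⟨h1, _⟩; omega)]
  | succ n ih =>
    intro a b t hf ha hb
    have hat : a < (t.length : Int) := by omega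
    rw [PySem.List.pyRange_one_cons (by omega)]
    simp only [List.foldl_cons]
    by_cases hPa : PySem.Int.mod (PySem.List.pyGetD w a 0) 2 ≠ 0
    · rw [if_pos hPa]
      have hul : (PySem.List.pySetD t a
          (Char.ofNat ((49 - ((PySem.List.pyGetD t a ' ').toNat : Int) + 48).toNat))).length
          = t.length := PySem.List.length_pySetD _ _ _
      obtain ⟨ihlen, ihget⟩ := ih (a + 1) b _ (by omega) (by omega) (by rw [hul]; exact hb)
      refine ⟨by rw [ihlen, hul], ?_⟩
      intro k hk
      rw [ihget k (by rw [hul]; exact hk)]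
      congr 1
      have hua : ∀ (j : Nat) (hj : j < t.length),
          (PySem.List.pySetD t a
            (Char.ofNat ((49 - ((PySem.List.pyGetD t a ' ').toNat : Int) + 48).toNat)))[j]'(by rw [hul]; exact hj)
          = if a.toNat = j then
              Char.ofNat ((49 - (((t[a.toNat]'(by omega)).toNat : Int)) + 48).toNat)
            else t[j] := by
        intro j hj
        simp only [PySem.List.pySetD_of_nonneg t _ ha, List.getElem_set,
          PySem.List.pyGetD_eq_getElem t ' ' ha hat]
      rw [hua k hk]
      by_cases hka : (k : Int) = a
      · simp only [hka]
        rw [if_pos (show a.toNat = k from by omega),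
            if_neg (show ¬(a + 1 ≤ a ∧ PySem.Int.mod (PySem.List.pyGetD w a 0) 2 ≠ 0) from
              by rintro ⟨h1, _⟩; omega),
            if_pos (⟨le_refl a, hPa⟩ :
              a ≤ a ∧ PySem.Int.mod (PySem.List.pyGetD w a 0) 2 ≠ 0)]
        simp only [show a.toNat = k from by omega]
      · rw [if_neg (show ¬(a.toNat = k) from by omega)]
        apply if_congr _ rfl rfl
        constructor <;> (rintro ⟨h1, h2⟩; exact ⟨by omega, h2⟩)
    · rw [if_neg hPa]
      obtain ⟨ihlen, ihget⟩ := ih (a + 1) b t (by omega) (by omega) hb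
      refine ⟨ihlen, ?_⟩
      intro k hk
      rw [ihget k hk]
      congr 1
      by_cases hka : (k : Int) = a
      · rw [if_neg (show ¬(a + 1 ≤ (k : Int) ∧
              PySem.Int.mod (PySem.List.pyGetD w (k : Int) 0) 2 ≠ 0) from
            by rintro ⟨h1, _⟩; omega),
          if_neg (show ¬(a ≤ (k : Int) ∧
              PySem.Int.mod (PySem.List.pyGetD w (k : Int) 0) 2 ≠ 0) from
            by rintro ⟨h1, h2⟩; rw [hka] at h2; exact hPa h2)]
      · apply if_congr _ rfl rfl
        constructor <;> (rintro ⟨h1, h2⟩; exact ⟨by omega, h2⟩)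

-- ===== VERDICT (by name: the statement is the Claim_ definition above) =====
theorem toggleQuery_spec : Claim_equal_toggleQuery := by
  intro strr Q M hdom hpre
  obtain ⟨hMQ, hqB, -⟩ := hpre
  have hq : ∀ q ∈ Q.take M.toNat, 2 ≤ q.length ∧ 0 ≤ PySem.List.pyGetD q 0 0 ∧
      PySem.List.pyGetD q 0 0 ≤ PySem.List.pyGetD q 1 0 ∧
      PySem.List.pyGetD q 1 0 < (strr.toList.length : Int) := by
    intro q hq'
    have h := (List.all_eq_true.mp hqB) q hq'
    simp only [Bool.and_eq_true, decide_eq_true_eq] at h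
    exact ⟨h.1.1.1, h.1.1.2, h.1.2, h.2⟩
  show toggleQuery strr Q M = toggleQuery_alt strr Q M
  unfold toggleQuery toggleQuery_alt
  simp only []
  set s := strr.toList with hs
  -- turn both query loops into folds over the first M queries
  rw [pvQfold Q M hMQ (fun pc q =>
      PySem.List.pySetD (PySem.List.pySetD pc (PySem.List.pyGetD q 0 0)
          (PySem.List.pyGetD pc (PySem.List.pyGetD q 0 0) 0 + 1))
        (PySem.List.pyGetD q 1 0 + 1)
        (PySem.List.pyGetD (PySem.List.pySetD pc (PySem.List.pyGetD q 0 0)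
            (PySem.List.pyGetD pc (PySem.List.pyGetD q 0 0) 0 + 1))
          (PySem.List.pyGetD q 1 0 + 1) 0 - 1)) (List.replicate (s.length + 1) 0),
    pvQfold Q M hMQ (fun cnt q =>
      (PySem.List.pyRange (PySem.List.pyGetD q 0 0) (PySem.List.pyGetD q 1 0 + 1) 1).foldl
        (fun cnt j => PySem.List.pySetD cnt j (PySem.List.pyGetD cnt j 0 + 1)) cnt)
      (List.replicate s.length 0)]
  set qs := List.take M.toNat Q with hqs
  set pc1 := qs.foldl (fun pc q =>
      PySem.List.pySetD (PySem.List.pySetD pc (PySem.List.pyGetD q 0 0)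
          (PySem.List.pyGetD pc (PySem.List.pyGetD q 0 0) 0 + 1))
        (PySem.List.pyGetD q 1 0 + 1)
        (PySem.List.pyGetD (PySem.List.pySetD pc (PySem.List.pyGetD q 0 0)
            (PySem.List.pyGetD pc (PySem.List.pyGetD q 0 0) 0 + 1))
          (PySem.List.pyGetD q 1 0 + 1) 0 - 1)) (List.replicate (s.length + 1) (0 : Int)) with hpc1
  set cnt := qs.foldl (fun cnt q =>
      (PySem.List.pyRange (PySem.List.pyGetD q 0 0) (PySem.List.pyGetD q 1 0 + 1) 1).foldl
        (fun cnt j => PySem.List.pySetD cnt j (PySem.List.pyGetD cnt j 0 + 1)) cnt)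
      (List.replicate s.length (0 : Int)) with hcnt
  have hlpc1 : pc1.length = s.length + 1 := by
    rw [hpc1, pvPhase1Len, List.length_replicate]
  have hlcnt : cnt.length = s.length := by
    rw [hcnt, pvFoldLen _ _ (fun c q => pvIncrLen _ _ c), List.length_replicate]
  have hcast : ((s.length : Int) + 1) = (pc1.length : Int) := by
    rw [hlpc1]; push_cast; ring
  rw [hcast]
  set pc2 := (PySem.List.pyRange 1 (pc1.length : Int)).foldl (fun pc i =>
      PySem.List.pySetD pc i
        (PySem.List.pyGetD pc i 0 + PySem.List.pyGetD pc (i - 1) 0)) pc1 with hpc2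
  have hpc2v : ∀ k : Int, 0 ≤ k → k < (s.length : Int) →
      PySem.List.pyGetD pc2 k 0 = pvCov qs k := by
    intro k hk0 hk
    rw [hpc2, pvPhase2 ((pc1.length : Int) - 1).toNat 1 pc1 pc1 rfl le_rfl rfl
        (fun j hj0 hj1 => by
          have hj : j = 0 := by omega
          rw [hj, pvPS_zero pc1 (by omega)])
        (fun j hj1 hj2 => rfl) k hk0 (by rw [hlpc1]; push_cast; omega)]
    rw [hpc1, pvPhase1 qs _ (fun q hq' => by
        obtain ⟨h2, h0, hlr, hr⟩ := hq q hq'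
        exact ⟨h0, hlr, by rw [List.length_replicate]; omega⟩)
      k hk0 (by rw [List.length_replicate]; omega)]
    have hps0 : pvPS (List.replicate (s.length + 1) (0 : Int)) k = 0 := by
      unfold pvPS; rw [List.take_replicate]; simp
    rw [hps0, zero_add]
  have hcntv : ∀ k : Int, 0 ≤ k → k < (s.length : Int) →
      PySem.List.pyGetD cnt k 0 = pvCov qs k := by
    intro k hk0 hk
    rw [hcnt, pvCnt qs _ (fun q hq' => by
        obtain ⟨h2, h0, hlr, hr⟩ := hq q hq'
        exact ⟨h0, hlr, by rw [List.length_replicate]; exact hr⟩)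
      k hk0 (by rw [List.length_replicate]; exact hk)]
    have hz : PySem.List.pyGetD (List.replicate s.length (0 : Int)) k 0 = 0 := by
      rw [PySem.List.pyGetD_eq_getElem _ 0 hk0 (by rw [List.length_replicate]; exact hk),
        List.getElem_replicate]
    rw [hz, zero_add]
  rw [PySem.List.foldl_append_singleton_eq_map (fun p : Int × Char =>
      if PySem.Int.mod (PySem.List.pyGetD cnt p.1 0) 2 ≠ 0 then
        Char.ofNat ((49 - ((p.2).toNat : Int) + 48).toNat) else p.2) (PySem.List.enumerate s) []]
  rw [List.nil_append, PySem.List.enumerate_eq_map_pyRange s ' ', List.map_map,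
    PySem.List.len_eq]
  obtain ⟨hAlen, hAget⟩ := pvFlip pc2 s.length 0 (s.length : Int) s (by omega) le_rfl rfl
  congr 1
  apply List.ext_getElem?
  intro n
  by_cases hn : n < s.length
  · rw [hAget n hn, PySem.List.getElem?_map_pyRange_zero _ s.length n hn]
    congr 1
    simp only [Function.comp_apply]
    rw [PySem.List.pyGetD_eq_getElem s ' ' (by omega) (by omega)]
    rw [hpc2v n (by omega) (by omega), hcntv n (by omega) (by omega)]
    have hcond : (0 ≤ (n : Int) ∧ PySem.Int.mod (pvCov qs n) 2 ≠ 0)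
        ↔ (PySem.Int.mod (pvCov qs n) 2 ≠ 0) := and_iff_right (by omega)
    rw [if_congr hcond rfl rfl]
    simp only [show ((n : Int)).toNat = n from by omega]
  · rw [List.getElem?_eq_none (by rw [hAlen]; omega),
      List.getElem?_eq_none (by rw [List.length_map, PySem.List.length_pyRange_one]; omega)]
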